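-- pv_equiv track=rewrite | github.com/Zengx-nd/GRID-pipeline | event_reconstructor.py | get_utc_pps
-- ===== SOURCE A (Python) =====
-- def get_utc_pps(timestamp_refs):
--     ind = 0
--     ans = timestamp_refs[0]
--     pps_for_utc_stamp = []
--     while True:
--         pps_for_utc_stamp.append(ans)
--         while timestamp_refs[ind] == ans:
--             ind += 1
--             if ind == len(timestamp_refs):
--                 return pps_for_utc_stamp
--         ans = timestamp_refs[ind]
-- ===== SOURCE B (Python) =====
-- def get_utc_pps(timestamp_refs):
--     head = timestamp_refs[0]
--     return [head] + [cur for prev, cur in zip(timestamp_refs, timestamp_refs[1:]) if cur != prev]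
-- ===== Notes on version B (the rewrite author's own statement) =====
-- stated objective: simpler
-- what changed: Replaces A's nested while-loops with explicit index bookkeeping by a stateless zip of the list with its own tail, keeping elements that differ from their predecessor.
import Mathlib
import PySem

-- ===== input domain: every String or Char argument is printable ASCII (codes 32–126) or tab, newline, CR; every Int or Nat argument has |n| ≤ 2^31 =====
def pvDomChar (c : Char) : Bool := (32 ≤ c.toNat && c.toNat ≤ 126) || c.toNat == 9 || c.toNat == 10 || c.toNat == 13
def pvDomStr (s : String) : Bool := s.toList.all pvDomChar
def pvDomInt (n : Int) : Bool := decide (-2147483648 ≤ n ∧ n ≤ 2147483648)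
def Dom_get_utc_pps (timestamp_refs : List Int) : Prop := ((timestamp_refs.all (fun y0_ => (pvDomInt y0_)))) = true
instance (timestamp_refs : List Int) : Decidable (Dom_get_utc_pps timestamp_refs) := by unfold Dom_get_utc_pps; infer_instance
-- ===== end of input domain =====

-- B replaces A's nested index-advancing while-loops by a zip-with-tail comprehension
-- keeping elements that differ from their predecessor (objective: simpler).
-- Pre_ excludes the empty list, on which Python A raises IndexError (timestamp_refs[0]).


-- ===== PORT A =====
-- inner `while timestamp_refs[ind] == ans: ind += 1; if ind == len(...): return ...`:
-- advances ind past the run of values equal to ans; returns the first index with a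
-- different value, or the length.
def pvInnerA (xs : List Int) (ans : Int) (ind : Nat) : Nat :=
  if h : ind < xs.length then
    if xs[ind] = ans then pvInnerA xs ans (ind + 1) else ind
  else ind
termination_by xs.length - ind

-- outer `while True` loop of A: appends ans, skips its run, reloads ans.  The fuel
-- argument only makes the loop total; A's loop always terminates within xs.length
-- iterations (each iteration strictly advances ind).
def pvOuterA (xs : List Int) : Nat → Nat → Int → List Int → List Int
  | 0, _, _, acc => acc
  | fuel + 1, ind, ans, acc =>
    let acc' := acc ++ [ans]
    let i := pvInnerA xs ans ind
    if h : i < xs.length then pvOuterA xs fuel i xs[i] acc' else acc'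

def get_utc_pps (timestamp_refs : List Int) : List Int :=
  if h : 0 < timestamp_refs.length then
    pvOuterA timestamp_refs timestamp_refs.length 0 timestamp_refs[0] []
  else []  -- Python raises IndexError here; excluded by Pre_

-- ===== PORT B =====
def get_utc_pps_alt (timestamp_refs : List Int) : List Int :=
  match timestamp_refs with
  | [] => []  -- Python B raises IndexError here (timestamp_refs[0]); excluded by Pre_
  | x :: rest =>
      x :: ((timestamp_refs.zip rest).filter (fun p => decide (p.2 ≠ p.1))).map Prod.snd

-- ===== PRECONDITION & SPEC =====
-- Pre_ excludes exactly the empty list, on which Python A raises IndexError.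
def Pre_get_utc_pps (timestamp_refs : List Int) : Prop := timestamp_refs ≠ []
instance (timestamp_refs : List Int) : Decidable (Pre_get_utc_pps timestamp_refs) := by
  unfold Pre_get_utc_pps; infer_instance
def pvWitness_get_utc_pps : List Int := [1, 1, 2]

def Spec_get_utc_pps (timestamp_refs : List Int) (out : List Int) : Prop := out = get_utc_pps_alt timestamp_refs
instance (timestamp_refs : List Int) (out : List Int) : Decidable (Spec_get_utc_pps timestamp_refs out) := by unfold Spec_get_utc_pps; infer_instance

-- ===== CLAIM (what is proved, stated in full; the proofs are below) =====
def Claim_equal_get_utc_pps : Prop := ∀ (timestamp_refs : List Int), Dom_get_utc_pps timestamp_refs → Pre_get_utc_pps timestamp_refs → Spec_get_utc_pps timestamp_refs (get_utc_pps timestamp_refs)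

-- ===== LEMMAS AND PROOFS =====

-- canonical consecutive-run collapse: representative of each run of equal values
def pvCollapse (a : Int) : List Int → List Int
  | [] => [a]
  | y :: ys => if y = a then pvCollapse a ys else a :: pvCollapse y ys

theorem pvInnerA_spec (xs : List Int) (ans : Int) (ind : Nat) :
    ind ≤ pvInnerA xs ans ind ∧
    xs.drop (pvInnerA xs ans ind) = (xs.drop ind).dropWhile (fun y => y == ans) := by
  fun_induction pvInnerA xs ans ind with
  | case1 ind h heq ih =>
      refine ⟨le_trans (Nat.le_succ ind) ih.1, ?_⟩
      rw [ih.2, List.drop_eq_getElem_cons h, List.dropWhile_cons]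
      simp [heq]
  | case2 ind h heq =>
      refine ⟨le_refl _, ?_⟩
      rw [List.drop_eq_getElem_cons h, List.dropWhile_cons]
      simp [heq]
  | case3 ind h =>
      have : xs.drop ind = [] := List.drop_eq_nil_of_le (by omega)
      simp [this]

theorem pvCollapse_of_dropWhile_nil (a : Int) (l : List Int)
    (h : l.dropWhile (fun y => y == a) = []) : pvCollapse a l = [a] := by
  induction l with
  | nil => rfl
  | cons y ys ih =>
      rw [List.dropWhile_cons] at h
      by_cases hy : y = a
      · rw [if_pos (by simp [hy])] at h; simp [pvCollapse, hy, ih h]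
      · rw [if_neg (by simp [hy])] at h; simp at h

theorem pvCollapse_of_dropWhile_cons (a : Int) (l : List Int) (y : Int) (ys : List Int)
    (h : l.dropWhile (fun z => z == a) = y :: ys) :
    pvCollapse a l = a :: pvCollapse y ys := by
  induction l with
  | nil => simp at h
  | cons z zs ih =>
      rw [List.dropWhile_cons] at h
      by_cases hz : z = a
      · rw [if_pos (by simp [hz])] at h; simp [pvCollapse, hz, ih h]
      · rw [if_neg (by simp [hz])] at h
        obtain ⟨rfl, rfl⟩ := List.cons.injEq .. ▸ h
        simp [pvCollapse, hz]

theorem pvOuterA_spec (xs : List Int) (fuel ind : Nat) (ans : Int) (acc : List Int)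
    (hlt : ind < xs.length) (hget : xs[ind] = ans) (hfuel : xs.length - ind ≤ fuel) :
    pvOuterA xs fuel ind ans acc = acc ++ pvCollapse ans (xs.drop (ind + 1)) := by
  induction fuel generalizing ind ans acc with
  | zero => omega
  | succ fuel ih =>
      have hstep : pvInnerA xs ans ind = pvInnerA xs ans (ind + 1) := by
        rw [pvInnerA]; simp [hlt, hget]
      obtain ⟨hge, hdrop⟩ := pvInnerA_spec xs ans (ind + 1)
      rw [show pvOuterA xs (fuel + 1) ind ans acc
            = (if h : pvInnerA xs ans ind < xs.length then
                 pvOuterA xs fuel (pvInnerA xs ans ind) (xs[pvInnerA xs ans ind]'h) (acc ++ [ans])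
               else acc ++ [ans]) from rfl]
      simp only [hstep]
      set i := pvInnerA xs ans (ind + 1) with hi
      by_cases h : i < xs.length
      · rw [dif_pos h]
        rw [ih i xs[i] (acc ++ [ans]) h rfl (by omega)]
        have hcons : (xs.drop (ind + 1)).dropWhile (fun y => y == ans)
            = xs[i] :: xs.drop (i + 1) := by
          rw [← hdrop, List.drop_eq_getElem_cons h]
        rw [pvCollapse_of_dropWhile_cons ans _ _ _ hcons]
        simp [List.append_assoc]
      · rw [dif_neg h]
        have hnil : (xs.drop (ind + 1)).dropWhile (fun y => y == ans) = [] := by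
          rw [← hdrop]; exact List.drop_eq_nil_of_le (by omega)
        rw [pvCollapse_of_dropWhile_nil ans _ hnil]

theorem pvCollapse_zip (l : List Int) (a : Int) :
    a :: (((a :: l).zip l).filter (fun p => decide (p.2 ≠ p.1))).map Prod.snd
      = pvCollapse a l := by
  induction l generalizing a with
  | nil => rfl
  | cons y ys ih =>
      by_cases hy : y = a
      · simp only [pvCollapse, if_pos hy, List.zip_cons_cons, List.filter_cons]
        subst hy
        simpa using ih y
      · simp only [pvCollapse, if_neg hy, List.zip_cons_cons, List.filter_cons]
        simp only [decide_not, ne_eq, hy, not_false_iff, decide_true]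
        rw [← ih y]
        simp

-- ===== VERDICT (by name: the statement is the Claim_ definition above) =====
theorem get_utc_pps_spec : Claim_equal_get_utc_pps := by
  intro xs _ hpre
  unfold Spec_get_utc_pps
  cases xs with
  | nil => exact absurd rfl hpre
  | cons x rest =>
      have hlt : 0 < (x :: rest).length := by simp
      unfold get_utc_pps
      rw [dif_pos hlt]
      simp only [List.getElem_cons_zero]
      rw [pvOuterA_spec (x :: rest) (x :: rest).length 0 x [] hlt rfl (le_refl _)]
      show [] ++ pvCollapse x ((x :: rest).drop (0 + 1)) = get_utc_pps_alt (x :: rest)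
      simp only [List.nil_append, List.drop_succ_cons, List.drop_zero, get_utc_pps_alt]
      exact (pvCollapse_zip rest x).symm
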